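-- pv_equiv track=rewrite | github.com/berkayyildiz97/GSP-Algorithm | GSP.py | generate_candidates
-- ===== SOURCE A (Python) =====
-- def generate_candidates(frequent_k_minus_1_sequences):
--     candidate_k_sequences = {}
--     for sequence1 in frequent_k_minus_1_sequences:
--         sequence1_last = sequence1[2:]
--         for sequence2 in frequent_k_minus_1_sequences:
--             sequence2_first = sequence2[:-2]
--             if sequence2_first == sequence1_last:
--                 candidate_k_sequences[sequence1+sequence2[-2:]] = 0
--     return candidate_k_sequences
-- ===== SOURCE B (Python) =====
-- def generate_candidates(frequent_k_minus_1_sequences):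
--     # Index sequences by their (k-2)-prefix once, then look up each suffix.
--     by_prefix = {}
--     for s in frequent_k_minus_1_sequences:
--         by_prefix.setdefault(s[:-2], []).append(s[-2:])
--     candidate_k_sequences = {}
--     for s in frequent_k_minus_1_sequences:
--         for tail in by_prefix.get(s[2:], []):
--             candidate_k_sequences[s + tail] = 0
--     return candidate_k_sequences
-- ===== Notes on version B (the rewrite author's own statement) =====
-- stated objective: faster
-- what changed: B builds a hash index from (k-2)-prefix to the list of 2-character tails in one pass and looks up each sequence's suffix, replacing A's quadratic all-pairs inner scan.
import Mathlib
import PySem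

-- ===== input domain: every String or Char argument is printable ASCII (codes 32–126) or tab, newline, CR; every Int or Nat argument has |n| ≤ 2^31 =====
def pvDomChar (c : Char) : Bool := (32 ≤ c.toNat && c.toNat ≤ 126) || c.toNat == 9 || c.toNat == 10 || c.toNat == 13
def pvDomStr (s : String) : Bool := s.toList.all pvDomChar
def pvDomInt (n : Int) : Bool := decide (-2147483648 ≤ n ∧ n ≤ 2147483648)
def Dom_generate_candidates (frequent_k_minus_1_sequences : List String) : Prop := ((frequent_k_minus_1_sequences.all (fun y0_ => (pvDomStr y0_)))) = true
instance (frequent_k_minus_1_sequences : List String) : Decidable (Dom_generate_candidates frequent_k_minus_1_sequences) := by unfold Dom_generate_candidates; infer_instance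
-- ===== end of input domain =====

-- B replaces A's quadratic all-pairs prefix/suffix scan by a one-pass prefix index (dict) queried per sequence; same return value.

-- ===== PORT A =====
-- literal transliteration of A: double loop over the list, inserting matching joins into a dict
def generate_candidates (frequent_k_minus_1_sequences : List String) : List (String × Int) :=
  (frequent_k_minus_1_sequences.foldl (fun d sequence1 =>
    let sequence1_last := PySem.Str.slice sequence1 (some 2) none
    frequent_k_minus_1_sequences.foldl (fun d sequence2 =>
      let sequence2_first := PySem.Str.slice sequence2 none (some (-2))
      if sequence2_first == sequence1_last then
        d.insert (sequence1 ++ PySem.Str.slice sequence2 (some (-2)) none) (0 : Int)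
      else d) d)
    PySem.Dict.empty).items

-- ===== PORT B =====
-- literal transliteration of B: build the prefix→tails index once, then look up each suffix
def generate_candidates_alt (frequent_k_minus_1_sequences : List String) : List (String × Int) :=
  let by_prefix : PySem.Dict String (List String) :=
    frequent_k_minus_1_sequences.foldl (fun d s =>
      d.modify (PySem.Str.slice s none (some (-2))) [] (· ++ [PySem.Str.slice s (some (-2)) none]))
      PySem.Dict.empty
  (frequent_k_minus_1_sequences.foldl (fun d s =>
    (by_prefix.getD (PySem.Str.slice s (some 2) none) []).foldl (fun d tail =>
      d.insert (s ++ tail) (0 : Int)) d)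
    PySem.Dict.empty).items

-- ===== PRECONDITION & SPEC =====
def Spec_generate_candidates (frequent_k_minus_1_sequences : List String) (out : List (String × Int)) : Prop := out = generate_candidates_alt frequent_k_minus_1_sequences
instance (frequent_k_minus_1_sequences : List String) (out : List (String × Int)) : Decidable (Spec_generate_candidates frequent_k_minus_1_sequences out) := by unfold Spec_generate_candidates; infer_instance

-- ===== CLAIM (what is proved, stated in full; the proofs are below) =====
def Claim_equal_generate_candidates : Prop := ∀ (frequent_k_minus_1_sequences : List String), Dom_generate_candidates frequent_k_minus_1_sequences → Spec_generate_candidates frequent_k_minus_1_sequences (generate_candidates frequent_k_minus_1_sequences)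

-- ===== LEMMAS AND PROOFS =====

-- A's guarded inner loop equals a fold over the filtered-and-mapped tails.
theorem foldl_if_filter_map {α β δ : Type} (q : α → Bool) (f : α → β)
    (step : δ → β → δ) (l : List α) (d : δ) :
    l.foldl (fun d x => if q x then step d (f x) else d) d
    = ((l.filter q).map f).foldl step d := by
  induction l generalizing d with
  | nil => rfl
  | cons x xs ih =>
    simp only [List.foldl_cons, List.filter_cons]
    by_cases h : q x
    · simp only [h, if_true, List.map_cons, List.foldl_cons]; exact ih _
    · simp only [h, if_false, Bool.false_eq_true]; exact ih _

-- The prefix index's entry at p is exactly the tails of the sequences whose prefix is p.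
theorem byPrefix_getD (l : List String) (p : String) :
    (l.foldl (fun d s =>
        d.modify (PySem.Str.slice s none (some (-2))) []
          (· ++ [PySem.Str.slice s (some (-2)) none]))
      PySem.Dict.empty).getD p []
    = (l.filter (fun s => PySem.Str.slice s none (some (-2)) == p)).map
        (fun s => PySem.Str.slice s (some (-2)) none) := by
  have h := PySem.Dict.getD_foldl_modify_append
    (l := l.map (fun s => (PySem.Str.slice s none (some (-2)),
                           PySem.Str.slice s (some (-2)) none)))
    (d := (PySem.Dict.empty : PySem.Dict String (List String))) (c := p)
  rw [List.foldl_map] at h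
  simpa [List.filter_map, Function.comp, List.map_map] using h

theorem generate_candidates_spec : Claim_equal_generate_candidates := by
  intro l _
  show generate_candidates l = generate_candidates_alt l
  simp only [generate_candidates, generate_candidates_alt]
  refine congrArg PySem.Dict.items ?_
  apply List.foldl_ext
  intro d s1 _
  rw [foldl_if_filter_map (fun s2 => PySem.Str.slice s2 none (some (-2)) ==
        PySem.Str.slice s1 (some 2) none)
      (fun s2 => PySem.Str.slice s2 (some (-2)) none)
      (fun d tail => d.insert (s1 ++ tail) (0 : Int)) l d,
     byPrefix_getD]
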